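-- pv_equiv track=rewrite | github.com/nokaut/wsknn | wsknn/preprocessing/utils/files.py | _get_possible_dates_upper_bound_only
-- ===== SOURCE A (Python) =====
-- def _get_possible_dates_upper_bound_only(upper_date, fileslist):
--     sorted_files = sorted(fileslist)
--     flist = []
--     check = 0
--     for fname in sorted_files:
--         if check == 0:
--             flist.append(fname)
--             if upper_date in fname:
--                 check = 1
--         else:
--             if upper_date in fname:
--                 flist.append(fname)
--             else:
--                 break
--
--     return flist
-- ===== SOURCE B (Python) =====
-- def _get_possible_dates_upper_bound_only(upper_date, fileslist):
--     s = sorted(fileslist)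
--     for i, fname in enumerate(s):
--         if upper_date in fname:
--             j = i
--             while j + 1 < len(s) and upper_date in s[j + 1]:
--                 j += 1
--             return s[:j + 1]
--     return s
-- ===== Notes on version B (the rewrite author's own statement) =====
-- stated objective: simpler
-- what changed: Instead of a flag-driven incremental append loop, B finds the first matching index in the sorted list, advances an index through the contiguous run of matches, and returns a single slice (the whole list if nothing matches).
import Mathlib
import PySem

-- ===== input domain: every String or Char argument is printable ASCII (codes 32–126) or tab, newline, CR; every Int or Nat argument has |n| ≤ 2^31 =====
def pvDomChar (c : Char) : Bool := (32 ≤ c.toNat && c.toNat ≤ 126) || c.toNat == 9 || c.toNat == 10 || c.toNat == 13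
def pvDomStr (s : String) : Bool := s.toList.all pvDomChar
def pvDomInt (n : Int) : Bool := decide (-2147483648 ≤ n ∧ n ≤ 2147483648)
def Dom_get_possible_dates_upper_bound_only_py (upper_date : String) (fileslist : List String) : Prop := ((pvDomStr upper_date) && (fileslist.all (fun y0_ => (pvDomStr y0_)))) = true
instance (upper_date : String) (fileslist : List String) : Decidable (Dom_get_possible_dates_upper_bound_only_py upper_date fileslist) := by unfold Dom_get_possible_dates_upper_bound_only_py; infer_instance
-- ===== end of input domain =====

-- B replaces A's flag-driven incremental append loop by: find the first matching
-- index in the sorted list, advance through the contiguous run of matches, return one slice.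

-- ===== PORT A =====
-- the for-loop over sorted_files with state (flist via the returned list, check)
def pvLoopA (u : String) : List String → Nat → List String
  | [], _ => []
  | f :: rest, check =>
    if check = 0 then
      f :: (if PySem.Str.isIn u f then pvLoopA u rest 1 else pvLoopA u rest 0)
    else
      if PySem.Str.isIn u f then f :: pvLoopA u rest 1 else []

def get_possible_dates_upper_bound_only_py (upper_date : String) (fileslist : List String) : List String :=
  pvLoopA upper_date (PySem.List.sorted fileslist (fun x => x) false) 0

-- ===== PORT B =====
-- the enumerate scan for the first index whose name contains upper_date
def pvFindB (u : String) : List String → Nat → Option Nat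
  | [], _ => none
  | f :: r, i => if PySem.Str.isIn u f then some i else pvFindB u r (i + 1)

-- the while loop 'while j+1 < len(s) and upper_date in s[j+1]: j += 1'
-- (s.getD (j+1) "" is s[j+1]; the bound guard keeps the access in range, so getD is exact)
def pvAdvB (u : String) (s : List String) (j : Nat) : Nat :=
  if j + 1 < s.length ∧ PySem.Str.isIn u (s.getD (j + 1) "") then pvAdvB u s (j + 1) else j
  termination_by s.length - j
  decreasing_by omega

def get_possible_dates_upper_bound_only_py_alt (upper_date : String) (fileslist : List String) : List String :=
  let s := PySem.List.sorted fileslist (fun x => x) false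
  match pvFindB upper_date s 0 with
  | none => s
  | some i => s.take (pvAdvB upper_date s i + 1)   -- s[:j+1], nonnegative slice = take

-- ===== PRECONDITION & SPEC =====
def Spec_get_possible_dates_upper_bound_only_py (upper_date : String) (fileslist : List String) (out : List String) : Prop := out = get_possible_dates_upper_bound_only_py_alt upper_date fileslist
instance (upper_date : String) (fileslist : List String) (out : List String) : Decidable (Spec_get_possible_dates_upper_bound_only_py upper_date fileslist out) := by unfold Spec_get_possible_dates_upper_bound_only_py; infer_instance

-- ===== CLAIM (what is proved, stated in full; the proofs are below) =====
def Claim_equal_get_possible_dates_upper_bound_only_py : Prop := ∀ (upper_date : String) (fileslist : List String), Dom_get_possible_dates_upper_bound_only_py upper_date fileslist → Spec_get_possible_dates_upper_bound_only_py upper_date fileslist (get_possible_dates_upper_bound_only_py upper_date fileslist)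

-- ===== LEMMAS AND PROOFS =====

-- A's loop in state check=1 is takeWhile
theorem pvLoopA_one (u : String) (l : List String) :
    pvLoopA u l 1 = l.takeWhile (fun f => PySem.Str.isIn u f) := by
  induction l with
  | nil => rfl
  | cons f r ih =>
    simp only [pvLoopA, List.takeWhile_cons]
    split
    · simp_all
    · simp_all

-- the element the while-guard reads, as head of the dropped suffix
theorem pvDropGetD (s : List String) (j : Nat) (h : j + 1 < s.length) :
    s.drop (j + 1) = s.getD (j + 1) "" :: s.drop (j + 1 + 1) := by
  rw [List.drop_eq_getElem_cons h]
  congr 1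
  rw [List.getD_eq_getElem?_getD, List.getElem?_eq_getElem h]
  rfl

-- B's while loop computed: final j = j + length of the run of matches after position j
theorem pvAdvB_eq (u : String) (s : List String) (j : Nat) :
    pvAdvB u s j = j + ((s.drop (j + 1)).takeWhile (fun f => PySem.Str.isIn u f)).length := by
  rw [pvAdvB]
  split
  · rename_i h
    obtain ⟨hlt, hin⟩ := h
    rw [pvAdvB_eq u s (j + 1)]
    rw [pvDropGetD s j hlt, List.takeWhile_cons, hin]
    simp only [if_true, List.length_cons]
    omega
  · rename_i h
    rcases Nat.lt_or_ge (j + 1) s.length with hlt | hge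
    · have hin : PySem.Str.isIn u (s.getD (j + 1) "") = false := by
        rcases Bool.eq_false_or_eq_true (PySem.Str.isIn u (s.getD (j + 1) "")) with hf | hf
        · exact absurd ⟨hlt, hf⟩ h
        · exact hf
      rw [pvDropGetD s j hlt, List.takeWhile_cons, hin]
      simp
    · rw [List.drop_eq_nil_of_le hge]; simp
  termination_by s.length - j
  decreasing_by omega

-- index accumulator shift for B's scan
theorem pvFindB_shift (u : String) (l : List String) (k : Nat) :
    pvFindB u l k = (pvFindB u l 0).map (· + k) := by
  induction l generalizing k with
  | nil => rfl
  | cons f r ih =>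
    simp only [pvFindB]
    split
    · simp
    · rw [ih (k + 1), ih 1]
      cases pvFindB u r 0
      · simp
      · simp; omega

-- B's core on an arbitrary list
def pvBCore (u : String) (s : List String) : List String :=
  match pvFindB u s 0 with
  | none => s
  | some i => s.take (pvAdvB u s i + 1)

theorem loopA_eq_bCore (u : String) (l : List String) :
    pvLoopA u l 0 = pvBCore u l := by
  induction l with
  | nil => rfl
  | cons f r ih =>
    by_cases hf : PySem.Str.isIn u f = true
    · -- first element matches: run starts here
      simp only [pvLoopA, hf, if_pos, pvBCore, pvFindB]
      rw [pvLoopA_one, pvAdvB_eq]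
      simp only [Nat.zero_add, List.drop_succ_cons, List.drop_zero, List.take_succ_cons]
      have hpre : r.takeWhile (fun f => PySem.Str.isIn u f) <+: r := List.takeWhile_prefix _
      rw [← List.prefix_iff_eq_take.mp hpre]
    · -- first element does not match
      have hf' : PySem.Str.isIn u f = false := by simpa using hf
      simp only [pvLoopA, hf', Bool.false_eq_true, if_false]
      rw [ih]
      simp only [pvBCore, pvFindB, hf', Bool.false_eq_true, if_false]
      rw [pvFindB_shift u r 1]
      cases hfind : pvFindB u r 0 with
      | none => simp
      | some i =>
        simp only [Option.map_some]
        rw [pvAdvB_eq, pvAdvB_eq]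
        simp only [List.drop_succ_cons, if_true, List.take_succ_cons, List.cons.injEq, true_and]
        congr 1
        omega

-- ===== VERDICT (by name: the statement is the Claim_ definition above) =====
theorem get_possible_dates_upper_bound_only_py_spec : Claim_equal_get_possible_dates_upper_bound_only_py := by
  intro u fl _
  unfold Spec_get_possible_dates_upper_bound_only_py get_possible_dates_upper_bound_only_py get_possible_dates_upper_bound_only_py_alt
  exact loopA_eq_bCore u (PySem.List.sorted fl (fun x => x) false)
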